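-- pv_equiv track=rewrite | github.com/AlifSrSE/ProblemSolves | 1427A-avoidingZero.py | solve
-- ===== SOURCE A (Python) =====
-- def solve(a):
--     total_sum = sum(a)
--     negatives = [x for x in a if x < 0]
--     positives = [x for x in a if x > 0]
--     zeros = [x for x in a if x == 0]
--
--     if total_sum < 0:
--         res = negatives + positives + zeros
--         return f"YES\n{' '.join(map(str, res))}"
--     elif total_sum > 0:
--         res = positives + negatives + zeros
--         return f"YES\n{' '.join(map(str, res))}"
--     else:
--         return "NO"
-- ===== SOURCE B (Python) =====
-- def solve(a):
--     total = sum(a)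
--     if total == 0:
--         return "NO"
--     if total < 0:
--         rank = lambda x: 2 if x == 0 else (0 if x < 0 else 1)
--     else:
--         rank = lambda x: 2 if x == 0 else (0 if x > 0 else 1)
--     res = sorted(a, key=rank)
--     return f"YES\n{' '.join(map(str, res))}"
-- ===== Notes on version B (the rewrite author's own statement) =====
-- stated objective: idiomatic
-- what changed: Replaces the three list-comprehension passes plus concatenation with one stable sort under a sign-dependent 3-valued rank key (negatives/positives first depending on the total's sign, zeros last), relying on sort stability to preserve relative order.
import Mathlib
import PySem

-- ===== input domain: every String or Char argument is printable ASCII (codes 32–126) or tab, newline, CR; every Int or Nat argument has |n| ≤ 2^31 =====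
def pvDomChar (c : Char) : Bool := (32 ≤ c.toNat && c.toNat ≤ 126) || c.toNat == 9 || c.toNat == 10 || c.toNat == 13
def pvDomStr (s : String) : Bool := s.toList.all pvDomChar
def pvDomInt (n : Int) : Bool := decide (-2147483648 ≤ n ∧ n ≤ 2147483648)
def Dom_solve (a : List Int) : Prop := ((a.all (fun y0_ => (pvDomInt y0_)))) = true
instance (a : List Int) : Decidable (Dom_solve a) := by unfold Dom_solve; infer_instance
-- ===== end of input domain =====

-- B replaces A's three filtering passes + concatenation with one stable sort under a
-- sign-dependent 3-valued rank key (zeros ranked last); idiomatic, not faster.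


-- ===== PORT A =====
def solve (a : List Int) : String :=
  let total_sum := a.sum
  let negatives := a.filter (fun x => x < 0)
  let positives := a.filter (fun x => x > 0)
  let zeros := a.filter (fun x => x == 0)
  if total_sum < 0 then
    "YES\n" ++ PySem.Str.join " " ((negatives ++ positives ++ zeros).map PySem.Int.toStr)
  else if total_sum > 0 then
    "YES\n" ++ PySem.Str.join " " ((positives ++ negatives ++ zeros).map PySem.Int.toStr)
  else
    "NO"

-- ===== PORT B =====
def rankNeg (x : Int) : Int := if x = 0 then 2 else if x < 0 then 0 else 1
def rankPos (x : Int) : Int := if x = 0 then 2 else if x > 0 then 0 else 1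

def solve_alt (a : List Int) : String :=
  let total := a.sum
  if total == 0 then "NO"
  else
    let key := if total < 0 then rankNeg else rankPos
    let res := PySem.List.sorted a key
    "YES\n" ++ PySem.Str.join " " (res.map PySem.Int.toStr)

-- ===== PRECONDITION & SPEC =====
def Spec_solve (a : List Int) (out : String) : Prop := out = solve_alt a
instance (a : List Int) (out : String) : Decidable (Spec_solve a out) := by unfold Spec_solve; infer_instance

-- ===== CLAIM (what is proved, stated in full; the proofs are below) =====
def Claim_equal_solve : Prop := ∀ (a : List Int), Dom_solve a → Spec_solve a (solve a)

-- ===== LEMMAS AND PROOFS =====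

lemma insertBy_skip {α : Type} (before : α → α → Bool) (x : α) (l r : List α)
    (h : ∀ y ∈ l, before x y = false) :
    PySem.List.insertBy before x (l ++ r) = l ++ PySem.List.insertBy before x r := by
  induction l with
  | nil => simp
  | cons y ys ih =>
    have hy : before x y = false := h y (by simp)
    simp [PySem.List.insertBy, hy, ih (fun z hz => h z (by simp [hz]))]

lemma insertBy_here {α : Type} (before : α → α → Bool) (x : α) (r : List α)
    (h : ∀ y ∈ r, before x y = true) :
    PySem.List.insertBy before x r = x :: r := by
  cases r with
  | nil => rfl
  | cons y ys => simp [PySem.List.insertBy, h y (by simp)]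

-- A stable sort under a {0,1,2}-valued key is the concatenation of the three key classes.
lemma sorted_tri (k : Int → Int) (hk : ∀ x : Int, k x = 0 ∨ k x = 1 ∨ k x = 2) (a : List Int) :
    PySem.List.sorted a k =
      a.filter (fun x => k x == 0) ++ a.filter (fun x => k x == 1) ++ a.filter (fun x => k x == 2) := by
  rw [PySem.List.sorted_eq_foldl_insertBy]
  induction a using List.reverseRecOn with
  | nil => simp
  | append_singleton as x ih =>
    rw [List.foldl_append, List.foldl_cons, List.foldl_nil, ih]
    have mem0 : ∀ y ∈ as.filter (fun x => k x == 0), k y = 0 := by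
      intro y hy; simpa using (List.of_mem_filter hy)
    have mem1 : ∀ y ∈ as.filter (fun x => k x == 1), k y = 1 := by
      intro y hy; simpa using (List.of_mem_filter hy)
    have mem2 : ∀ y ∈ as.filter (fun x => k x == 2), k y = 2 := by
      intro y hy; simpa using (List.of_mem_filter hy)
    rcases hk x with h0 | h1 | h2
    · rw [List.append_assoc,
          insertBy_skip _ _ _ _ (by intro y hy; simp [h0, mem0 y hy]),
          insertBy_here _ _ _ (by
            intro y hy
            rcases List.mem_append.mp hy with hy1 | hy2
            · simp [h0, mem1 y hy1]
            · simp [h0, mem2 y hy2])]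
      simp [List.filter_append, h0]
    · rw [insertBy_skip _ _ _ _ (by
            intro y hy
            rcases List.mem_append.mp hy with hy0 | hy1
            · simp [h1, mem0 y hy0]
            · simp [h1, mem1 y hy1]),
          insertBy_here _ _ _ (by intro y hy; simp [h1, mem2 y hy])]
      simp [List.filter_append, h1]
    · rw [PySem.List.insertBy_of_forall_not_before _ _ _ (by
        intro y hy
        rcases List.mem_append.mp hy with hy01 | hy2
        · rcases List.mem_append.mp hy01 with hy0 | hy1
          · simp [h2, mem0 y hy0]
          · simp [h2, mem1 y hy1]
        · simp [h2, mem2 y hy2])]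
      simp [List.filter_append, h2]

lemma rankNeg_cases (x : Int) : rankNeg x = 0 ∨ rankNeg x = 1 ∨ rankNeg x = 2 := by
  unfold rankNeg; split_ifs <;> simp

lemma rankPos_cases (x : Int) : rankPos x = 0 ∨ rankPos x = 1 ∨ rankPos x = 2 := by
  unfold rankPos; split_ifs <;> simp

lemma sorted_rankNeg (a : List Int) :
    PySem.List.sorted a rankNeg =
      a.filter (fun x => x < 0) ++ a.filter (fun x => x > 0) ++ a.filter (fun x => x == 0) := by
  rw [sorted_tri rankNeg rankNeg_cases,
      List.filter_congr (p := fun x => rankNeg x == 0) (q := fun x => decide (x < 0))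
        (by intro x _; simp only [rankNeg]; split_ifs <;> simp <;> omega),
      List.filter_congr (p := fun x => rankNeg x == 1) (q := fun x => decide (x > 0))
        (by intro x _; simp only [rankNeg]; split_ifs <;> simp <;> omega),
      List.filter_congr (p := fun x => rankNeg x == 2) (q := fun x => x == 0)
        (by intro x _; simp only [rankNeg]; split_ifs <;> simp <;> omega)]

lemma sorted_rankPos (a : List Int) :
    PySem.List.sorted a rankPos =
      a.filter (fun x => x > 0) ++ a.filter (fun x => x < 0) ++ a.filter (fun x => x == 0) := by
  rw [sorted_tri rankPos rankPos_cases,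
      List.filter_congr (p := fun x => rankPos x == 0) (q := fun x => decide (x > 0))
        (by intro x _; simp only [rankPos]; split_ifs <;> simp <;> omega),
      List.filter_congr (p := fun x => rankPos x == 1) (q := fun x => decide (x < 0))
        (by intro x _; simp only [rankPos]; split_ifs <;> simp <;> omega),
      List.filter_congr (p := fun x => rankPos x == 2) (q := fun x => x == 0)
        (by intro x _; simp only [rankPos]; split_ifs <;> simp <;> omega)]

-- ===== VERDICT (by name: the statement is the Claim_ definition above) =====
theorem solve_spec : Claim_equal_solve := by
  intro a _
  unfold Spec_solve solve solve_alt
  rcases lt_trichotomy a.sum 0 with hneg | hzero | hpos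
  · have hne : (a.sum == 0) = false := by simp; omega
    simp only [hneg, if_pos, hne, Bool.false_eq_true, if_false]
    rw [sorted_rankNeg]
  · simp [hzero]
  · have hne : (a.sum == 0) = false := by simp; omega
    have hnlt : ¬ a.sum < 0 := by omega
    simp only [if_neg hnlt, hne, Bool.false_eq_true, if_false, if_pos hpos]
    rw [sorted_rankPos]
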